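-- pv_equiv track=rewrite | github.com/MrBrantCode/unitest_baseline | mut_generate/mist_train_cf/cf_50200/solution.py | palindrome_prime
-- ===== SOURCE A (Python) =====
-- def palindrome_prime(n):
--     """
--     Generates a list of all palindrome prime numbers less than or equal to n.
--
--     Args:
--     n (int): A positive integer.
--
--     Returns:
--     list: A list of palindrome prime numbers.
--     """
--     def is_prime(num):
--         if num <= 1 or (num % 2 == 0 and num > 2):
--             return False
--         return all(num % i for i in range(3, int(num**0.5) + 1, 2))
--
--     def is_palindrome(num):
--         return str(num) == str(num)[::-1]
--
--     return [x for x in range(2, n+1) if is_prime(x) and is_palindrome(x)]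
-- ===== SOURCE B (Python) =====
-- def palindrome_prime(n):
--     """
--     Generates a list of all palindrome prime numbers less than or equal to n.
--
--     Sieve-based: mark composites once (multiples of each d from d*d up),
--     then keep the unmarked palindromic numbers.
--     """
--     if n < 2:
--         return []
--     sieve = [True] * (n + 1)
--     sieve[0] = False
--     sieve[1] = False
--     d = 2
--     while d * d <= n:
--         for j in range(d * d, n + 1, d):
--             sieve[j] = False
--         d += 1
--     return [x for x in range(2, n + 1) if sieve[x] and str(x) == str(x)[::-1]]
-- ===== Notes on version B (the rewrite author's own statement) =====
-- stated objective: faster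
-- what changed: Replaced per-number trial division (odd divisors up to sqrt(x) for every x) by a single composite-marking sieve over [0,n], then one palindrome-filtering pass.
import Mathlib
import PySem

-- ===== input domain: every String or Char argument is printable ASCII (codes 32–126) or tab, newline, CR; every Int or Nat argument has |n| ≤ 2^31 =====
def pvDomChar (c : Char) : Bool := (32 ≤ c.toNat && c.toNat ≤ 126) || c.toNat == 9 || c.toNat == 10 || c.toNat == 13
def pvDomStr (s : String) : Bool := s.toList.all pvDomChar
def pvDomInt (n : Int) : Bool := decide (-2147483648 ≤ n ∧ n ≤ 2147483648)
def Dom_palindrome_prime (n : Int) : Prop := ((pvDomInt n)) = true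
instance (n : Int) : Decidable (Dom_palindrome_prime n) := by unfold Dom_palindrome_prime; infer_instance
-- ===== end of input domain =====

-- B replaces per-number trial division by one composite-marking sieve over [0, n] (objective: faster).

-- ===== PORT A =====
-- str(num) == str(num)[::-1], compared on the character lists (string equality = equality of toList)
def pvIsPalin (x : Int) : Bool := PySem.Int.toChars x == (PySem.Int.toChars x).reverse

-- is_prime: int(num**0.5) is ported as Nat.sqrt, exact here since double sqrt is correctly
-- rounded and num ≤ 2^31 < 2^52 (and the sqrt is only reached for num ≥ 2, so toNat is exact).
def pvIsPrime (num : Int) : Bool :=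
  if num ≤ 1 || (PySem.Int.mod num 2 == 0 && num > 2) then false
  else (PySem.List.pyRange 3 ((Nat.sqrt num.toNat : Int) + 1) 2).all
        (fun i => PySem.Int.mod num i != 0)

def palindrome_prime (n : Int) : List Int :=
  (PySem.List.pyRange 2 (n + 1) 1).filter (fun x => pvIsPrime x && pvIsPalin x)

-- ===== PORT B =====
-- for j in range(d*d, n+1, d): sieve[j] = False   (0 < d is only a totality guard; callers have d ≥ 2)
def pvMark (s : List Bool) (j n d : Nat) : List Bool :=
  if _h : j ≤ n ∧ 0 < d then pvMark (s.set j false) (j + d) n d else s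
  termination_by n + 1 - j
  decreasing_by omega

-- while d*d <= n: mark multiples of d; d += 1
def pvSieveLoop (s : List Bool) (d n : Nat) : List Bool :=
  if _h : d * d ≤ n then pvSieveLoop (pvMark s (d * d) n d) (d + 1) n else s
  termination_by n + 1 - d
  decreasing_by
    rcases Nat.eq_zero_or_pos d with h0 | h0
    · omega
    · have : d ≤ d * d := Nat.le_mul_of_pos_left d h0
      omega

-- indices are nonnegative and in range here, so n.toNat / x.toNat are exact
def palindrome_prime_alt (n : Int) : List Int :=
  if n < 2 then []
  else
    let s := pvSieveLoop (((List.replicate (n.toNat + 1) true).set 0 false).set 1 false) 2 n.toNat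
    (PySem.List.pyRange 2 (n + 1) 1).filter
      (fun x => PySem.List.pyGetD s x false && pvIsPalin x)

-- ===== PRECONDITION & SPEC =====
def Spec_palindrome_prime (n : Int) (out : List Int) : Prop := out = palindrome_prime_alt n
instance (n : Int) (out : List Int) : Decidable (Spec_palindrome_prime n out) := by unfold Spec_palindrome_prime; infer_instance

-- ===== CLAIM (what is proved, stated in full; the proofs are below) =====
def Claim_equal_palindrome_prime : Prop := ∀ (n : Int), Dom_palindrome_prime n → Spec_palindrome_prime n (palindrome_prime n)

-- ===== LEMMAS AND PROOFS =====

theorem pvMark_length (s : List Bool) (j n d : Nat) :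
    (pvMark s j n d).length = s.length := by
  fun_induction pvMark with
  | case1 s j h ih => rw [ih]; simp
  | case2 => rfl

theorem pvSieveLoop_length (s : List Bool) (d n : Nat) :
    (pvSieveLoop s d n).length = s.length := by
  fun_induction pvSieveLoop with
  | case1 s d h ih => rw [ih, pvMark_length]
  | case2 => rfl

theorem pvMark_getElem? (s : List Bool) (j n d : Nat) (hd : 0 < d)
    (x : Nat) (hx : x ≤ n) : n < s.length →
    ((pvMark s j n d)[x]? = if j ≤ x ∧ d ∣ (x - j) then some false else s[x]?) := by
  fun_induction pvMark with
  | case2 s j h =>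
    intro hlen
    rw [if_neg]; rintro ⟨h1, -⟩; omega
  | case1 s j h ih =>
    intro hlen
    rw [ih (by simpa using hlen)]
    by_cases hxj : x = j
    · subst hxj
      rw [if_neg (show ¬(x + d ≤ x ∧ d ∣ x - (x + d)) by rintro ⟨h1, -⟩; omega),
        if_pos (show x ≤ x ∧ d ∣ x - x from ⟨le_rfl, by simp⟩),
        List.getElem?_set, if_pos rfl, if_pos (show x < s.length by omega)]
    · have hset : (s.set j false)[x]? = s[x]? := by
        rw [List.getElem?_set, if_neg (fun hh => hxj hh.symm)]
      rw [hset]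
      have hiff : x ≥ j + d → (d ∣ x - (j + d) ↔ d ∣ x - j) := by
        intro hge
        constructor
        · intro hh
          have heq : x - j = (x - (j + d)) + d := by omega
          rw [heq]; exact Nat.dvd_add hh (dvd_refl d)
        · intro hh
          have heq : x - (j + d) = (x - j) - d := by omega
          rw [heq]; exact Nat.dvd_sub hh (dvd_refl d)
      split_ifs with h1 h2 h2
      · rfl
      · exact absurd ⟨by omega, (hiff h1.1).mp h1.2⟩ h2
      · rcases h2 with ⟨hjx, hdvd⟩
        by_cases hge : j + d ≤ x
        · exact absurd ⟨hge, (hiff hge).mpr hdvd⟩ h1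
        · have := Nat.le_of_dvd (by omega) hdvd
          omega
      · rfl

theorem pvSieveLoop_getElem? (s : List Bool) (d n : Nat)
    (x : Nat) (hx : x ≤ n) : 2 ≤ d → n < s.length →
    ((pvSieveLoop s d n)[x]? =
      if ∃ e ∈ Finset.Icc d x, e * e ≤ x ∧ e ∣ x then some false else s[x]?) := by
  fun_induction pvSieveLoop with
  | case2 s d h =>
    intro hd hlen
    rw [if_neg]
    rintro ⟨e, he, h1, -⟩
    rw [Finset.mem_Icc] at he
    have := Nat.mul_le_mul he.1 he.1
    omega
  | case1 s d h ih =>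
    intro hd hlen
    rw [ih (by omega) (by rw [pvMark_length]; exact hlen),
      pvMark_getElem? _ _ _ _ (by omega) _ hx hlen]
    have hmark : (d * d ≤ x ∧ d ∣ x - (d * d)) ↔ (d * d ≤ x ∧ d ∣ x) := by
      constructor
      · rintro ⟨h1, h2⟩
        refine ⟨h1, ?_⟩
        have heq : x = (x - d * d) + d * d := by omega
        rw [heq]; exact Nat.dvd_add h2 (Dvd.intro d rfl)
      · rintro ⟨h1, h2⟩
        exact ⟨h1, Nat.dvd_sub h2 (Dvd.intro d rfl)⟩
    have hsplit : (∃ e ∈ Finset.Icc d x, e * e ≤ x ∧ e ∣ x) ↔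
        ((d * d ≤ x ∧ d ∣ x) ∨ ∃ e ∈ Finset.Icc (d + 1) x, e * e ≤ x ∧ e ∣ x) := by
      constructor
      · rintro ⟨e, he, h1, h2⟩
        rw [Finset.mem_Icc] at he
        rcases Nat.eq_or_lt_of_le he.1 with heq | hlt
        · exact Or.inl ⟨heq ▸ h1, heq ▸ h2⟩
        · exact Or.inr ⟨e, Finset.mem_Icc.mpr ⟨hlt, he.2⟩, h1, h2⟩
      · rintro (⟨h1, h2⟩ | ⟨e, he, h1, h2⟩)
        · have hdx : d ≤ x := le_trans (Nat.le_mul_of_pos_left d (by omega)) h1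
          exact ⟨d, Finset.mem_Icc.mpr ⟨le_rfl, hdx⟩, h1, h2⟩
        · rw [Finset.mem_Icc] at he
          exact ⟨e, Finset.mem_Icc.mpr ⟨by omega, he.2⟩, h1, h2⟩
    by_cases h1 : ∃ e ∈ Finset.Icc (d + 1) x, e * e ≤ x ∧ e ∣ x
    · rw [if_pos h1, if_pos (hsplit.mpr (Or.inr h1))]
    · rw [if_neg h1]
      by_cases h2 : d * d ≤ x ∧ d ∣ x - d * d
      · rw [if_pos h2, if_pos (hsplit.mpr (Or.inl (hmark.mp h2)))]
      · rw [if_neg h2, if_neg]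
        intro hC
        rcases hsplit.mp hC with hc | hc
        · exact h2 (hmark.mpr hc)
        · exact h1 hc

theorem pv_no_small_divisor_iff (x : Nat) (hx : 2 ≤ x) :
    (¬ ∃ e ∈ Finset.Icc 2 x, e * e ≤ x ∧ e ∣ x) ↔ Nat.Prime x := by
  rw [Nat.prime_def_le_sqrt]
  constructor
  · intro hno
    refine ⟨hx, fun m hm hsq hdvd => hno ⟨m, Finset.mem_Icc.mpr ⟨hm, Nat.le_of_dvd (by omega) hdvd⟩, Nat.le_sqrt.mp hsq, hdvd⟩⟩
  · rintro ⟨-, hp⟩ ⟨e, he, h1, h2⟩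
    rw [Finset.mem_Icc] at he
    exact hp e he.1 (Nat.le_sqrt.mpr h1) h2


theorem pvIsPrime_iff (m : Nat) (hm : 2 ≤ m) :
    pvIsPrime (m : Int) = true ↔ Nat.Prime m := by
  rcases eq_or_lt_of_le hm with h2 | h3
  · subst h2
    constructor
    · intro _; exact Nat.prime_two
    · intro _
      unfold pvIsPrime
      have hs : Nat.sqrt (((2:Nat):Int)).toNat = 1 := by
        have h1 : 1 ≤ Nat.sqrt 2 := Nat.le_sqrt.mpr (by norm_num)
        have h2 : Nat.sqrt 2 < 2 := Nat.sqrt_lt_self (by norm_num)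
        simp only [Int.toNat_natCast]
        omega
      rw [hs, if_neg (by decide)]
      rw [show ((1:Nat):Int) + 1 = 2 by norm_num]
      rw [PySem.List.pyRange_of_pos (a := 3) (b := 2) (s := 2) (by norm_num)]
      simp
  by_cases heven : 2 ∣ m
  · have hfalse : pvIsPrime (m : Int) = false := by
      unfold pvIsPrime
      rw [if_pos]
      apply Bool.or_eq_true_iff.mpr
      right
      apply Bool.and_eq_true_iff.mpr
      refine ⟨beq_iff_eq.mpr ((PySem.Int.mod_eq_zero_iff_dvd _ _).mpr ?_), by simp; omega⟩
      exact_mod_cast Int.natCast_dvd_natCast.mpr heven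
    rw [hfalse]
    simp
    intro hp
    rcases (Nat.Prime.eq_one_or_self_of_dvd hp 2 heven) with h | h <;> omega
  · -- m odd, m ≥ 3
    unfold pvIsPrime
    rw [if_neg (by
      simp only [Bool.or_eq_true, Bool.and_eq_true, decide_eq_true_eq, beq_iff_eq]
      push Not
      refine ⟨by exact_mod_cast (by omega : (1:Int) < m), fun hmod => absurd ?_ heven⟩
      have := (PySem.Int.mod_eq_zero_iff_dvd (m : Int) 2).mp hmod
      exact_mod_cast this)]
    rw [List.all_eq_true]
    simp only [Int.toNat_natCast]
    constructor
    · intro hall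
      rw [Nat.prime_def_le_sqrt]
      refine ⟨hm, fun k hk hksqrt hkdvd => ?_⟩
      by_cases hkeven : 2 ∣ k
      · exact heven (dvd_trans hkeven hkdvd)
      · have hk3 : 3 ≤ k := by omega
        have hmem : (k : Int) ∈ PySem.List.pyRange 3 ((Nat.sqrt m : Int) + 1) 2 := by
          rw [PySem.List.mem_pyRange_iff_of_pos (by omega)]
          refine ⟨by exact_mod_cast hk3, by exact_mod_cast (by omega : (k:Int) < (Nat.sqrt m : Int) + 1), ?_⟩
          omega
        have := hall _ hmem
        rw [bne_iff_ne, ne_eq, PySem.Int.mod_eq_zero_iff_dvd] at this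
        exact this (Int.natCast_dvd_natCast.mpr hkdvd)
    · intro hp i hi
      rw [PySem.List.mem_pyRange_iff_of_pos (by omega)] at hi
      obtain ⟨hi3, hisqrt, -⟩ := hi
      rw [bne_iff_ne, ne_eq, PySem.Int.mod_eq_zero_iff_dvd]
      intro hdvd
      have hiN : i.toNat ∣ m := by
        have : ((i.toNat : Int)) = i := by omega
        exact_mod_cast this ▸ hdvd
      have hsq : Nat.sqrt m < m := Nat.sqrt_lt_self (by omega)
      rcases (Nat.Prime.eq_one_or_self_of_dvd hp _ hiN) with h | h <;> omega

theorem pv_cell_eq (n : Nat) (_hn : 2 ≤ n) (x : Nat) (h2 : 2 ≤ x) (hx : x ≤ n) :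
    (pvSieveLoop (((List.replicate (n + 1) true).set 0 false).set 1 false) 2 n)[x]?
      = some (pvIsPrime (x : Int)) := by
  have hlen : n < (((List.replicate (n + 1) true).set 0 false).set 1 false).length := by simp
  rw [pvSieveLoop_getElem? _ _ _ _ hx (by omega) hlen]
  have hs0 : (((List.replicate (n + 1) true).set 0 false).set 1 false)[x]? = some true := by
    rw [List.getElem?_set, if_neg (by omega), List.getElem?_set, if_neg (by omega),
      List.getElem?_replicate, if_pos (by omega)]
  have hiff := (pv_no_small_divisor_iff x h2).trans (pvIsPrime_iff x h2).symm
  by_cases hC : ∃ e ∈ Finset.Icc 2 x, e * e ≤ x ∧ e ∣ x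
  · rw [if_pos hC]
    have : ¬ (pvIsPrime (x : Int) = true) := fun hp => (hiff.mpr hp) hC
    simp only [Bool.not_eq_true] at this
    rw [this]
  · rw [if_neg hC, hs0, hiff.mp hC]

-- ===== VERDICT (by name: the statement is the Claim_ definition above) =====
theorem palindrome_prime_spec : Claim_equal_palindrome_prime := by
  intro n _
  unfold Spec_palindrome_prime palindrome_prime palindrome_prime_alt
  by_cases hn : n < 2
  · simp [PySem.List.pyRange_one_eq_nil (by omega : n + 1 ≤ 2), hn]
  · simp only [if_neg hn]
    apply List.filter_congr
    intro x hx
    rw [PySem.List.mem_pyRange_one] at hx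
    have hx0 : (0:Int) ≤ x := by omega
    have hxn : x.toNat ≤ n.toNat := by omega
    have h2x : 2 ≤ x.toNat := by omega
    have hcell := pv_cell_eq n.toNat (by omega) x.toNat h2x hxn
    have hlen : (pvSieveLoop (((List.replicate (n.toNat + 1) true).set 0 false).set 1 false) 2 n.toNat).length = n.toNat + 1 := by
      simp [pvSieveLoop_length]
    rw [PySem.List.pyGetD_of_nonneg _ _ hx0, List.getD_eq_getElem?_getD, hcell]
    have : ((x.toNat : Int)) = x := by omega
    rw [this]
    simp
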